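-- pv_equiv track=rewrite | github.com/cwbaxter22/TrainingTracker | main.py | check_trainings
-- ===== SOURCE A (Python) =====
-- REQUIRED_TRAININGS = [
--     "Electrical Safety Awareness Online",
--     "Fire Extinguisher Training Online",
--     "Asbestos General Awareness Online",
--     "Ladder Safety Online",
--     "Lockout Tagout Awareness Online",
--     "Confined Space Entry Awareness Online",
--     "Lead Awareness Online",
--     "Globally Harmonized System for Hazard Communication Online",
--     "Managing Laboratory Chemicals Online",
-- ]
--
-- def check_trainings(pasted_text):
--     results = {}
--
--     lines = pasted_text.splitlines()
--
--     for training in REQUIRED_TRAININGS: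
--         found_current = False
--         for line in lines:
--             if training in line and "Current" in line:
--                 found_current = True
--                 break
--         results[training] = found_current
--
--     return results
-- ===== SOURCE B (Python) =====
-- REQUIRED_TRAININGS = [
--     "Electrical Safety Awareness Online",
--     "Fire Extinguisher Training Online",
--     "Asbestos General Awareness Online",
--     "Ladder Safety Online",
--     "Lockout Tagout Awareness Online",
--     "Confined Space Entry Awareness Online",
--     "Lead Awareness Online",
--     "Globally Harmonized System for Hazard Communication Online",
--     "Managing Laboratory Chemicals Online",
-- ]
--
-- def check_trainings(pasted_text):
--     # Stage 1: collapse every line that mentions "Current" into one newline-joined blob.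
--     # Stage 2: one substring test per training against the blob.
--     # Correct because no training name contains a newline, so a match in the blob
--     # can never span the boundary between two joined lines.
--     blob = "\n".join(line for line in pasted_text.splitlines() if "Current" in line)
--     return {training: training in blob for training in REQUIRED_TRAININGS}
-- ===== Notes on version B (the rewrite author's own statement) =====
-- stated objective: alternative
-- what changed: B has no per-training scan of the lines at all: it filters the lines containing 'Current', joins them into a single newline-separated blob, and then answers each training with one substring test against that blob (sound since trainings contain no newline).
import Mathlib
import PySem

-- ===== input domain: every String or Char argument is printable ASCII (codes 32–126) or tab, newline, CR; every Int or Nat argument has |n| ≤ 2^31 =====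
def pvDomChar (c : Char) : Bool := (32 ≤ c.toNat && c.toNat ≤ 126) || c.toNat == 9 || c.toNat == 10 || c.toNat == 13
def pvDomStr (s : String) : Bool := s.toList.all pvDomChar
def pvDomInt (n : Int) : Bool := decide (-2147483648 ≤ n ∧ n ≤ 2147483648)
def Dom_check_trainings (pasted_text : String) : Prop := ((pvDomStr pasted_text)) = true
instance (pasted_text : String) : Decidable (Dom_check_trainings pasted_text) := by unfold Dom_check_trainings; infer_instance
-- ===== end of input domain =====

-- B joins the 'Current' lines into one blob and does one substring test per training
-- (sound because no training name contains a newline); A rescans all lines per training.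

def REQUIRED_TRAININGS : List String := [
  "Electrical Safety Awareness Online",
  "Fire Extinguisher Training Online",
  "Asbestos General Awareness Online",
  "Ladder Safety Online",
  "Lockout Tagout Awareness Online",
  "Confined Space Entry Awareness Online",
  "Lead Awareness Online",
  "Globally Harmonized System for Hazard Communication Online",
  "Managing Laboratory Chemicals Online"]

-- ===== PORT A =====
-- inner 'for line in lines: … break' of A, as structural recursion (found_current with early break)
def findCurrentA (training : String) : List String → Bool
  | [] => false
  | line :: rest =>
    if PySem.Str.isIn training line && PySem.Str.isIn "Current" line then true
    else findCurrentA training rest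

def check_trainings (pasted_text : String) : List (String × Bool) :=
  let lines := PySem.Str.splitlines pasted_text
  (REQUIRED_TRAININGS.foldl
    (fun (results : PySem.Dict String Bool) training =>
      results.insert training (findCurrentA training lines))
    PySem.Dict.empty).items

-- ===== PORT B =====
def check_trainings_alt (pasted_text : String) : List (String × Bool) :=
  let blob := PySem.Str.join "\n"
    ((PySem.Str.splitlines pasted_text).filter (fun line => PySem.Str.isIn "Current" line))
  (REQUIRED_TRAININGS.foldl
    (fun (results : PySem.Dict String Bool) training =>
      results.insert training (PySem.Str.isIn training blob))
    PySem.Dict.empty).items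

-- ===== PRECONDITION & SPEC =====
def Spec_check_trainings (pasted_text : String) (out : List (String × Bool)) : Prop := out = check_trainings_alt pasted_text
instance (pasted_text : String) (out : List (String × Bool)) : Decidable (Spec_check_trainings pasted_text out) := by unfold Spec_check_trainings; infer_instance

-- ===== CLAIM (what is proved, stated in full; the proofs are below) =====
def Claim_equal_check_trainings : Prop := ∀ (pasted_text : String), Dom_check_trainings pasted_text → Spec_check_trainings pasted_text (check_trainings pasted_text)

-- ===== LEMMAS AND PROOFS =====

theorem RT_nodup : REQUIRED_TRAININGS.Nodup := by decide

-- A's early-break scan is just 'any' over the lines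
theorem findCurrentA_eq_any (t : String) (ls : List String) :
    findCurrentA t ls = ls.any (fun l => PySem.Str.isIn t l && PySem.Str.isIn "Current" l) := by
  induction ls with
  | nil => rfl
  | cons l rest ih =>
    cases h : (PySem.Str.isIn t l && PySem.Str.isIn "Current" l) <;>
      simp [findCurrentA, ih]

-- A's result characterised: the table in order, entry t true iff some line contains t and "Current"
theorem portA_items (pasted_text : String) :
    check_trainings pasted_text =
      REQUIRED_TRAININGS.map (fun t => (t,
        (PySem.Str.splitlines pasted_text).any
          (fun l => PySem.Str.isIn t l && PySem.Str.isIn "Current" l))) := by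
  unfold check_trainings
  rw [PySem.Dict.items_foldl_insert_fresh]
  · simp [PySem.Dict.empty, findCurrentA_eq_any]
  · intro a _; rfl
  · simpa using RT_nodup

-- a prefix avoiding c of 'A ++ c :: B' is a prefix of A
theorem prefix_append_cons {c : Char} : ∀ {t A B : List Char}, c ∉ t →
    t <+: A ++ c :: B → t <+: A
  | [], _, _, _, _ => List.nil_prefix
  | x :: t', [], _, hc, hp => by
      simp only [List.nil_append, List.cons_prefix_cons] at hp
      exact absurd (hp.1 ▸ List.mem_cons_self) hc
  | x :: t', a :: A', B, hc, hp => by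
      simp only [List.cons_append, List.cons_prefix_cons] at hp
      exact List.cons_prefix_cons.mpr ⟨hp.1,
        prefix_append_cons (fun h => hc (List.mem_cons_of_mem _ h)) hp.2⟩

-- an infix avoiding c of 'A ++ c :: B' lies in A or in B
theorem infix_append_cons {c : Char} {t B : List Char} (hc : c ∉ t) :
    ∀ {A : List Char}, t <:+: A ++ c :: B → t <:+: A ∨ t <:+: B := by
  intro A
  induction A with
  | nil =>
    intro h
    rcases List.infix_cons_iff.mp h with hp | hi
    · cases t with
      | nil => exact Or.inl List.nil_infix
      | cons x t' =>
        simp only [List.cons_prefix_cons] at hp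
        exact absurd (hp.1 ▸ List.mem_cons_self) hc
    · exact Or.inr hi
  | cons a A' ih =>
    intro h
    rcases List.infix_cons_iff.mp h with hp | hi
    · exact Or.inl (prefix_append_cons hc hp).isInfix
    · rcases ih hi with h1 | h2
      · exact Or.inl (h1.trans (List.suffix_cons a A').isInfix)
      · exact Or.inr h2

-- substring test against a '\n'-joined list = any over the pieces, for '\n'-free nonempty t
theorem isIn_join_newline (t : List Char) (ht : t ≠ []) (hc : ('\n' : Char) ∉ t) :
    ∀ (parts : List (List Char)),
      PySem.Chars.isIn t (PySem.Chars.join ['\n'] parts)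
        = parts.any (fun l => PySem.Chars.isIn t l)
  | [] => by
      rw [PySem.Chars.join_nil]
      simp only [List.any_nil]
      rw [PySem.Chars.isIn_eq_false_iff]
      intro h
      exact ht (List.eq_nil_of_infix_nil h)
  | [a] => by rw [PySem.Chars.join_singleton]; simp
  | a :: b :: rest => by
      rw [PySem.Chars.join_cons_cons]
      have ihr := isIn_join_newline t ht hc (b :: rest)
      simp only [List.any_cons] at ihr ⊢
      rw [show a ++ ['\n'] ++ PySem.Chars.join ['\n'] (b :: rest)
            = a ++ '\n' :: PySem.Chars.join ['\n'] (b :: rest) by simp]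
      cases hres : (PySem.Chars.isIn t a || (PySem.Chars.isIn t b ||
          (rest.any fun l => PySem.Chars.isIn t l)))
      · rw [← ihr] at hres
        rcases Bool.or_eq_false_iff.mp hres with ⟨h1, h2⟩
        rw [PySem.Chars.isIn_eq_false_iff]
        intro h
        rcases infix_append_cons hc h with hA | hB
        · exact ((PySem.Chars.isIn_eq_false_iff _ _).mp h1) hA
        · exact ((PySem.Chars.isIn_eq_false_iff _ _).mp h2) hB
      · rw [← ihr] at hres
        rw [PySem.Chars.isIn_iff_infix]
        rcases Bool.or_eq_true_iff.mp hres with h1 | h2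
        · exact ((PySem.Chars.isIn_iff_infix _ _).mp h1).trans (List.prefix_append a _).isInfix
        · exact (((PySem.Chars.isIn_iff_infix _ _).mp h2).trans
            (List.suffix_cons '\n' _).isInfix).trans (List.suffix_append a _).isInfix

-- every training is nonempty and newline-free
theorem RT_ok : ∀ t ∈ REQUIRED_TRAININGS, t.toList ≠ [] ∧ ('\n' : Char) ∉ t.toList := by
  decide

-- B's result characterised the same way
theorem portB_items (pasted_text : String) :
    check_trainings_alt pasted_text =
      REQUIRED_TRAININGS.map (fun t => (t,
        (PySem.Str.splitlines pasted_text).any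
          (fun l => PySem.Str.isIn t l && PySem.Str.isIn "Current" l))) := by
  unfold check_trainings_alt
  rw [PySem.Dict.items_foldl_insert_fresh]
  · simp only [PySem.Dict.empty]
    refine List.map_congr_left (fun t ht => ?_)
    obtain ⟨h1, h2⟩ := RT_ok t ht
    simp only [PySem.Str.isIn_eq, PySem.Str.toList_join]
    rw [show ("\n" : String).toList = ['\n'] from rfl]
    rw [isIn_join_newline t.toList h1 h2]
    simp [List.any_filter, List.any_map, Function.comp_def, Bool.and_comm]
  · intro a _; rfl
  · simpa using RT_nodup

-- ===== VERDICT (by name: the statement is the Claim_ definition above) =====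
theorem check_trainings_spec : Claim_equal_check_trainings := by
  intro pasted_text _
  unfold Spec_check_trainings
  rw [portA_items, portB_items]
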